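-- pv_equiv track=rewrite | github.com/hacatu/project-euler | 276/p276.py | prim_brute
-- ===== SOURCE A (Python) =====
-- from math import gcd
--
-- def prim_brute(n):
-- 	res = 0
-- 	for a in range(1, n//3 + 1):
-- 		for b in range(a, n//2 + 1):
-- 			m = gcd(a, b)
-- 			for c in range(b, min(a + b, n - a - b + 1)):
-- 				if gcd(m, c) == 1:
-- 					res += 1
-- 	return res
-- ===== SOURCE B (Python) =====
-- from math import gcd
--
-- def _prime_factors(m):
--     # distinct prime factors of m (m >= 1), by trial division up to sqrt(m)
--     ps = []
--     p = 2
--     while p * p <= m: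
--         if m % p == 0:
--             ps.append(p)
--             while m % p == 0:
--                 m //= p
--         p += 1
--     if m > 1:
--         ps.append(m)
--     return ps
--
-- def _legendre(x, ps):
--     # number of c in [1..x] divisible by no element of ps (x >= 0, ps pairwise coprime)
--     if not ps:
--         return x
--     return _legendre(x, ps[1:]) - _legendre(x // ps[0], ps[1:])
--
-- def prim_brute(n):
--     res = 0
--     for a in range(1, n // 3 + 1):
--         for b in range(a, n // 2 + 1):
--             hi = min(a + b, n - a - b + 1)
--             if b < hi:
--                 ps = _prime_factors(gcd(a, b))
--                 res += _legendre(hi - 1, ps) - _legendre(b - 1, ps)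
--     return res
-- ===== Notes on version B (the rewrite author's own statement) =====
-- stated objective: faster
-- what changed: A's innermost loop over c with a gcd test per element is replaced by a closed-form count: B factors m = gcd(a,b) once by trial division and counts the integers in [b, hi) coprime to m via inclusion-exclusion over m's distinct prime factors (Legendre's formula), removing the inner scan entirely.
import Mathlib
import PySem

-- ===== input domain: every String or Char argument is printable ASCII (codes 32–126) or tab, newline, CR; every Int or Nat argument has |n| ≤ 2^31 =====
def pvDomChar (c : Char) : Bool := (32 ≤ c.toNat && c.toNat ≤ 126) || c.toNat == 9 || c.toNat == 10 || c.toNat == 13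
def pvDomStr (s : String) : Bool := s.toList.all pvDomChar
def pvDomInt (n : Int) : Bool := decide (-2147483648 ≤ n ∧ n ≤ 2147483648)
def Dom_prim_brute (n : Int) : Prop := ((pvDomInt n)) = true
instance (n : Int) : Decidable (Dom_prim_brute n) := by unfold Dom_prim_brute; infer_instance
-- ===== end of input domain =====

-- B replaces A's innermost gcd-filtered scan over c by a closed-form coprime count:
-- factor gcd(a,b) once by trial division and count c in [b, hi) coprime to it by
-- inclusion-exclusion (Legendre's formula); proved equal to A's triple loop for every n.



def prim_brute (n : Int) : Int :=
  (PySem.List.pyRange 1 (PySem.Int.floordiv n 3 + 1) 1).foldl (fun res a =>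
    (PySem.List.pyRange a (PySem.Int.floordiv n 2 + 1) 1).foldl (fun res b =>
      let m : Int := Int.gcd a b
      (PySem.List.pyRange b (min (a + b) (n - a - b + 1)) 1).foldl (fun res c =>
        if Int.gcd m c == 1 then res + 1 else res) res) res) 0

theorem floordiv_lt_self (m p : Int) (hm : 1 ≤ m) (hp : 2 ≤ p) :
    PySem.Int.floordiv m p < m ∧ 0 ≤ PySem.Int.floordiv m p := by
  constructor
  · rw [PySem.Int.floordiv_lt_iff_lt_mul (show (0:Int) < p by omega)]; nlinarith
  · have := (PySem.Int.le_floordiv_iff_mul_le (q := 0) (a := m) (b := p) (show (0:Int) < p by omega)).mpr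
    simpa using this (by omega)

def stripAll (p m : Int) : Int :=
  if h : 2 ≤ p ∧ 1 ≤ m ∧ PySem.Int.mod m p = 0 then stripAll p (PySem.Int.floordiv m p) else m
termination_by m.toNat
decreasing_by
  have := floordiv_lt_self m p h.2.1 h.1
  omega

theorem stripAll_le (p m : Int) (hm : 1 ≤ m) (hp : 2 ≤ p) :
    1 ≤ stripAll p m ∧ stripAll p m ≤ m := by
  fun_induction stripAll p m with
  | case1 m h ih =>
    obtain ⟨hp', hm', hmod⟩ := h
    have hdvd : p ∣ m := (PySem.Int.mod_eq_zero_iff_dvd m p).mp hmod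
    have hle : p ≤ m := Int.le_of_dvd (by omega) hdvd
    have h1 : 1 ≤ PySem.Int.floordiv m p := by
      rw [PySem.Int.le_floordiv_iff_mul_le (show (0:Int) < p by omega)]; omega
    have h2 := floordiv_lt_self m p hm' hp'
    have := ih h1
    omega
  | case2 m h => omega

def factorLoop (p m : Int) (ps : List Int) : List Int :=
  if 2 ≤ p ∧ p * p ≤ m then
    if PySem.Int.mod m p = 0 then factorLoop (p + 1) (stripAll p m) (ps ++ [p])
    else factorLoop (p + 1) m ps
  else if 1 < m then ps ++ [m] else ps
termination_by (m - p).toNat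
decreasing_by
  · obtain ⟨hp, hpp⟩ := ‹2 ≤ p ∧ p * p ≤ m›
    have h2p : 2 * p ≤ p * p := by nlinarith
    have hs := stripAll_le p m (by nlinarith) hp
    omega
  · obtain ⟨hp, hpp⟩ := ‹2 ≤ p ∧ p * p ≤ m›
    have h2p : 2 * p ≤ p * p := by nlinarith
    omega

def legendre (x : Int) : List Int → Int
  | [] => x
  | p :: rest => legendre x rest - legendre (PySem.Int.floordiv x p) rest

def prim_brute_alt (n : Int) : Int :=
  (PySem.List.pyRange 1 (PySem.Int.floordiv n 3 + 1) 1).foldl (fun res a =>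
    (PySem.List.pyRange a (PySem.Int.floordiv n 2 + 1) 1).foldl (fun res b =>
      let hi := min (a + b) (n - a - b + 1)
      if b < hi then
        let ps := factorLoop 2 (Int.gcd a b) []
        res + (legendre (hi - 1) ps - legendre (b - 1) ps)
      else res) res) 0


-- ===== PRECONDITION & SPEC =====
def Spec_prim_brute (n : Int) (out : Int) : Prop := out = prim_brute_alt n
instance (n : Int) (out : Int) : Decidable (Spec_prim_brute n out) := by unfold Spec_prim_brute; infer_instance

-- ===== CLAIM (what is proved, stated in full; the proofs are below) =====
def Claim_equal_prim_brute : Prop := ∀ (n : Int), Dom_prim_brute n → Spec_prim_brute n (prim_brute n)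

-- ===== LEMMAS AND PROOFS =====


def IntPrime (p : Int) : Prop := 2 ≤ p ∧ ∀ d : Int, 2 ≤ d → d ∣ p → d = p

theorem prime_gcd_eq_one_iff (p : Int) (hp : IntPrime p) (c : Int) :
    Int.gcd p c = 1 ↔ ¬ p ∣ c := by
  obtain ⟨hp2, hpd⟩ := hp
  constructor
  · intro h hdvd
    have h2 : p.natAbs ∣ Int.gcd p c :=
      Nat.dvd_gcd (dvd_refl _) (Int.natAbs_dvd_natAbs.mpr hdvd)
    rw [h] at h2
    have := Nat.le_of_dvd (by omega) h2
    omega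
  · intro h
    by_contra hne
    have hg0 : Int.gcd p c ≠ 0 := by
      intro h0
      have := Int.gcd_eq_zero_iff.mp h0
      omega
    have hg2 : 2 ≤ (Int.gcd p c : Int) := by omega
    have hdp : ((Int.gcd p c : Int)) ∣ p := Int.gcd_dvd_left p c
    have := hpd _ hg2 hdp
    have hdc : ((Int.gcd p c : Int)) ∣ c := Int.gcd_dvd_right p c
    rw [this] at hdc
    exact h hdc

theorem gcd_mul_eq_one_iff (x y c : Int) :
    Int.gcd (x * y) c = 1 ↔ Int.gcd x c = 1 ∧ Int.gcd y c = 1 := by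
  rw [← Int.isCoprime_iff_gcd_eq_one, ← Int.isCoprime_iff_gcd_eq_one,
    ← Int.isCoprime_iff_gcd_eq_one]
  exact IsCoprime.mul_left_iff

theorem stripAll_spec (p m : Int) (hp : 2 ≤ p) (hm : 1 ≤ m) :
    ¬ p ∣ stripAll p m ∧ stripAll p m ∣ m ∧
      (∀ c, Int.gcd p c = 1 → (Int.gcd m c = 1 ↔ Int.gcd (stripAll p m) c = 1)) := by
  fun_induction stripAll p m with
  | case1 m h ih =>
    obtain ⟨hp', hm', hmod⟩ := h
    have hdvd : p ∣ m := (PySem.Int.mod_eq_zero_iff_dvd m p).mp hmod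
    have hfd : PySem.Int.floordiv m p = m / p := PySem.Int.floordiv_eq_ediv_of_pos (by omega)
    have hle : p ≤ m := Int.le_of_dvd (by omega) hdvd
    have h1 : 1 ≤ PySem.Int.floordiv m p := by
      rw [PySem.Int.le_floordiv_iff_mul_le (show (0:Int) < p by omega)]; omega
    have heq : p * PySem.Int.floordiv m p = m := by
      rw [hfd]; exact Int.mul_ediv_cancel' hdvd
    obtain ⟨ih1, ih2, ih3⟩ := ih h1
    refine ⟨ih1, dvd_trans ih2 ⟨p, by rw [mul_comm, heq]⟩, ?_⟩
    intro c hc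
    rw [show Int.gcd m c = Int.gcd (p * PySem.Int.floordiv m p) c from by rw [heq], gcd_mul_eq_one_iff]
    constructor
    · rintro ⟨-, h2⟩; exact (ih3 c hc).mp h2
    · intro h2; exact ⟨hc, (ih3 c hc).mpr h2⟩
  | case2 m h =>
    push_neg at h
    have hmod := h hp hm
    have : ¬ p ∣ m := by
      intro hdvd
      exact hmod ((PySem.Int.mod_eq_zero_iff_dvd m p).mpr hdvd)
    exact ⟨this, dvd_rfl, fun c _ => Iff.rfl⟩

theorem factorLoop_spec (p m : Int) (ps : List Int) :
    2 ≤ p → 1 ≤ m → (∀ d : Int, 2 ≤ d → d < p → ¬ d ∣ m) →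
    ∃ L, factorLoop p m ps = ps ++ L ∧
      (∀ x ∈ L, 2 ≤ x) ∧
      (∀ x ∈ L, x ∣ m) ∧
      L.Pairwise (fun x y => Int.gcd x y = 1) ∧
      (∀ c, (Int.gcd m c = 1 ↔ ∀ x ∈ L, ¬ x ∣ c)) := by
  fun_induction factorLoop p m ps with
  | case1 p m ps hguard hmod ih =>
    intro hp hm hnd
    obtain ⟨hp2, hpp⟩ := hguard
    have hdvd : p ∣ m := (PySem.Int.mod_eq_zero_iff_dvd m p).mp hmod
    obtain ⟨hs1, hs2⟩ := stripAll_le p m hm hp2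
    obtain ⟨hnp, hsd, hiff⟩ := stripAll_spec p m hp2 hm
    have hprime : IntPrime p := by
      refine ⟨hp2, fun d hd2 hdp => ?_⟩
      by_contra hne
      have hdpos := Int.le_of_dvd (by omega) hdp
      exact hnd d hd2 (by omega) (hdp.trans hdvd)
    have hnd' : ∀ d : Int, 2 ≤ d → d < p + 1 → ¬ d ∣ stripAll p m := by
      intro d hd2 hdlt hdvd'
      rcases lt_or_eq_of_le (show d ≤ p by omega) with h | h
      · exact hnd d hd2 h (hdvd'.trans hsd)
      · rw [h] at hdvd'; exact hnp hdvd'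
    obtain ⟨L, hL, hL2, hLd, hLp, hLiff⟩ := ih (by omega) hs1 hnd'
    have hsplit : ∀ c, Int.gcd m c = 1 ↔ Int.gcd p c = 1 ∧ Int.gcd (stripAll p m) c = 1 := by
      intro c
      constructor
      · intro h
        have hk : Int.gcd p c ∣ Int.gcd m c :=
          Int.dvd_gcd ((Int.gcd_dvd_left p c).trans hdvd) (Int.gcd_dvd_right p c)
        rw [h] at hk
        have hpc : Int.gcd p c = 1 := Nat.dvd_one.mp hk
        exact ⟨hpc, (hiff c hpc).mp h⟩
      · rintro ⟨h1, h2⟩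
        exact (hiff c h1).mpr h2
    refine ⟨p :: L, by simpa [List.append_assoc] using hL, ?_, ?_, ?_, ?_⟩
    · intro x hx
      rcases List.mem_cons.mp hx with h | h
      · omega
      · exact hL2 x h
    · intro x hx
      rcases List.mem_cons.mp hx with h | h
      · rw [h]; exact hdvd
      · exact (hLd x h).trans hsd
    · rw [List.pairwise_cons]
      refine ⟨fun y hy => ?_, hLp⟩
      rw [prime_gcd_eq_one_iff p hprime y]
      intro hpy
      exact hnp (hpy.trans (hLd y hy))
    · intro c
      rw [hsplit c, prime_gcd_eq_one_iff p hprime c, hLiff c, List.forall_mem_cons]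
  | case2 p m ps hguard hmod ih =>
    intro hp hm hnd
    obtain ⟨hp2, hpp⟩ := hguard
    have hnpm : ¬ p ∣ m := fun h => hmod ((PySem.Int.mod_eq_zero_iff_dvd m p).mpr h)
    have hnd' : ∀ d : Int, 2 ≤ d → d < p + 1 → ¬ d ∣ m := by
      intro d hd2 hdlt
      rcases lt_or_eq_of_le (show d ≤ p by omega) with h | h
      · exact hnd d hd2 h
      · rw [h]; exact hnpm
    exact ih (by omega) hm hnd'
  | case3 p m ps hguard hm1 =>
    intro hp hm hnd
    have hpp : m < p * p := by
      rcases not_and_or.mp hguard with h | h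
      · omega
      · omega
    have hprime : IntPrime m := by
      refine ⟨by omega, fun d hd2 hdp => ?_⟩
      by_contra hne
      have hdle : d ≤ m := Int.le_of_dvd (by omega) hdp
      have heq : d * (m / d) = m := Int.mul_ediv_cancel' hdp
      set e := m / d with he
      have he0 : 0 ≤ e := Int.ediv_nonneg (by omega) (by omega)
      have he1 : e ≠ 0 := by intro h; rw [h, mul_zero] at heq; omega
      have hene : e ≠ 1 := by intro h; rw [h, mul_one] at heq; omega
      have he2 : 2 ≤ e := by omega
      rcases lt_or_ge d p with h | h
      · exact hnd d hd2 h hdp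
      · have hep : e < p := by nlinarith
        exact hnd e he2 hep ⟨d, by rw [mul_comm d e] at heq; exact heq.symm⟩
    refine ⟨[m], rfl, ?_, ?_, ?_, ?_⟩
    · intro x hx; rw [List.mem_singleton] at hx; omega
    · intro x hx; rw [List.mem_singleton] at hx; rw [hx]
    · exact List.pairwise_singleton _ _
    · intro c
      rw [prime_gcd_eq_one_iff m hprime c]
      simp
  | case4 p m ps hguard hm1 =>
    intro hp hm hnd
    have : m = 1 := by omega
    subst this
    refine ⟨[], by simp, by simp, by simp, List.Pairwise.nil, ?_⟩
    intro c
    simp [Int.one_gcd]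

theorem legendre_spec (ps : List Int) (h2 : ∀ x ∈ ps, 2 ≤ x)
    (hcp : ps.Pairwise (fun x y => Int.gcd x y = 1)) (x : Int) (hx : 0 ≤ x) :
    legendre x ps = (((Finset.Icc 1 x).filter (fun c => ∀ q ∈ ps, ¬ q ∣ c)).card : Int) := by
  induction ps generalizing x with
  | nil =>
    simp only [legendre]
    have h : ((Finset.Icc 1 x).filter (fun c => ∀ q ∈ ([]:List Int), ¬ q ∣ c)) = Finset.Icc 1 x := by
      apply Finset.filter_true_of_mem; simp
    rw [h, Int.card_Icc]; omega
  | cons p rest ih =>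
    have hp2 : 2 ≤ p := h2 p List.mem_cons_self
    have hrest2 : ∀ y ∈ rest, 2 ≤ y := fun y hy => h2 y (List.mem_cons_of_mem p hy)
    obtain ⟨hhead, hcp'⟩ := List.pairwise_cons.mp hcp
    have hfd : PySem.Int.floordiv x p = x / p := PySem.Int.floordiv_eq_ediv_of_pos (by omega)
    have hxp0 : 0 ≤ x / p := Int.ediv_nonneg hx (by omega)
    have e1 : legendre x (p :: rest) = legendre x rest - legendre (x / p) rest := by
      rw [legendre, hfd]
    rw [e1, ih hrest2 hcp' x hx, ih hrest2 hcp' (x / p) hxp0]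
    -- split the count over [1,x] of Q into (Q ∧ p∣·) + (Q ∧ ¬p∣·)
    have hsplit : ((Finset.Icc 1 x).filter (fun c => ∀ q ∈ rest, ¬ q ∣ c)).card
        = (((Finset.Icc 1 x).filter (fun c => ∀ q ∈ rest, ¬ q ∣ c)).filter (fun c => p ∣ c)).card
        + (((Finset.Icc 1 x).filter (fun c => ∀ q ∈ rest, ¬ q ∣ c)).filter (fun c => ¬ p ∣ c)).card := by
      exact (Finset.card_filter_add_card_filter_not _).symm
    -- bijection between multiples of p and [1, x/p]
    have hbij : (((Finset.Icc 1 x).filter (fun c => ∀ q ∈ rest, ¬ q ∣ c)).filter (fun c => p ∣ c)).card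
        = ((Finset.Icc 1 (x / p)).filter (fun c => ∀ q ∈ rest, ¬ q ∣ c)).card := by
      apply Finset.card_bij' (fun c _ => c / p) (fun c' _ => p * c')
      · intro c hc
        simp only [Finset.mem_filter, Finset.mem_Icc] at hc ⊢
        obtain ⟨⟨⟨hc1, hcx⟩, hQ⟩, hpc⟩ := hc
        have hceq : p * (c / p) = c := Int.mul_ediv_cancel' hpc
        refine ⟨⟨?_, Int.ediv_le_ediv (by omega) hcx⟩, ?_⟩
        · have : p ≤ c := Int.le_of_dvd (by omega) hpc
          rw [Int.le_ediv_iff_mul_le (by omega)]; omega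
        · intro q hq hqc
          exact hQ q hq (by rw [← hceq]; exact Dvd.dvd.mul_left hqc p)
      · intro c' hc'
        simp only [Finset.mem_filter, Finset.mem_Icc] at hc' ⊢
        obtain ⟨⟨hc1, hcx⟩, hQ⟩ := hc'
        have hmul : p * c' ≤ p * (x / p) := by
          apply mul_le_mul_of_nonneg_left hcx (by omega)
        have hrem : 0 ≤ x % p := Int.emod_nonneg x (by omega)
        have hdef : x % p = x - p * (x / p) := Int.emod_def x p
        have h11 : (1:Int) * 1 ≤ p * c' := mul_le_mul (by omega) (by omega) (by omega) (by omega)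
        refine ⟨⟨⟨by linarith, by linarith⟩, ?_⟩, dvd_mul_right p c'⟩
        intro q hq hqc
        apply hQ q hq
        have hco : IsCoprime q p := by
          rw [Int.isCoprime_iff_gcd_eq_one, Int.gcd_comm]
          exact hhead q hq
        exact hco.dvd_of_dvd_mul_right (by rwa [mul_comm] at hqc)
      · intro c hc
        simp only [Finset.mem_filter] at hc
        exact Int.mul_ediv_cancel' hc.2
      · intro c' _
        exact Int.mul_ediv_cancel_left c' (by omega)
    -- the cons predicate equals (Q ∧ ¬p∣·)
    have hpred : (Finset.Icc 1 x).filter (fun c => ∀ q ∈ p :: rest, ¬ q ∣ c)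
        = ((Finset.Icc 1 x).filter (fun c => ∀ q ∈ rest, ¬ q ∣ c)).filter (fun c => ¬ p ∣ c) := by
      rw [Finset.filter_filter]
      apply Finset.filter_congr
      intro c _
      simp only [List.forall_mem_cons]
      constructor
      · rintro ⟨h1, h2⟩; exact ⟨h2, h1⟩
      · rintro ⟨h1, h2⟩; exact ⟨h2, h1⟩
    rw [hpred]
    omega


theorem countP_pyRange (f : Int → Bool) (hi : Int) (lo : Int) :
    (PySem.List.pyRange lo hi 1).countP f = ((Finset.Ico lo hi).filter (fun c => f c = true)).card := by
  have H : ∀ k : Nat, ∀ lo : Int, (hi - lo).toNat ≤ k →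
      (PySem.List.pyRange lo hi 1).countP f = ((Finset.Ico lo hi).filter (fun c => f c = true)).card := by
    intro k
    induction k with
    | zero =>
      intro lo hk
      rw [PySem.List.pyRange_one_eq_nil (by omega), Finset.Ico_eq_empty (by omega)]
      simp
    | succ k ih =>
      intro lo hk
      by_cases hlt : lo < hi
      · rw [PySem.List.pyRange_one_cons hlt, List.countP_cons]
        have hins : Finset.Ico lo hi = insert lo (Finset.Ico (lo+1) hi) := by
          ext c; simp only [Finset.mem_Ico, Finset.mem_insert]; omega
        have hnotmem : lo ∉ (Finset.Ico (lo+1) hi).filter (fun c => f c = true) := by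
          intro h; have := Finset.mem_of_mem_filter _ h; simp at this
        rw [hins, Finset.filter_insert, ih (lo+1) (by omega)]
        by_cases hf : f lo = true
        · simp only [hf, if_true]
          rw [Finset.card_insert_of_notMem hnotmem]
        · simp only [hf, if_false]
          simp
      · rw [PySem.List.pyRange_one_eq_nil (by omega), Finset.Ico_eq_empty (by omega)]
        simp
  exact H (hi - lo).toNat lo le_rfl

theorem card_Ico_filter_split (b hi : Int) (hb : 1 ≤ b) (hlt : b < hi) (Q : Int → Prop) [DecidablePred Q] :
    ((Finset.Icc 1 (hi-1)).filter Q).card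
      = ((Finset.Icc 1 (b-1)).filter Q).card + ((Finset.Ico b hi).filter Q).card := by
  have hunion : Finset.Icc 1 (hi-1) = Finset.Icc 1 (b-1) ∪ Finset.Ico b hi := by
    ext c; simp only [Finset.mem_Icc, Finset.mem_Ico, Finset.mem_union]; omega
  have hdisj : Disjoint (Finset.Icc 1 (b-1)) (Finset.Ico b hi) := by
    rw [Finset.disjoint_left]
    intro c h1 h2
    simp only [Finset.mem_Icc] at h1
    simp only [Finset.mem_Ico] at h2
    omega
  rw [hunion, Finset.filter_union,
    Finset.card_union_of_disjoint (Finset.disjoint_filter_filter hdisj)]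


theorem step_eq (n a b acc : Int) (ha : 1 ≤ a) (hab : a ≤ b) :
    (PySem.List.pyRange b (min (a + b) (n - a - b + 1)) 1).foldl
      (fun r c => if Int.gcd (↑(Int.gcd a b) : Int) c == 1 then r + 1 else r) acc
    = (if b < min (a + b) (n - a - b + 1) then
        acc + (legendre (min (a + b) (n - a - b + 1) - 1) (factorLoop 2 (↑(Int.gcd a b)) [])
             - legendre (b - 1) (factorLoop 2 (↑(Int.gcd a b)) []))
      else acc) := by
  have hM : 1 ≤ (↑(Int.gcd a b) : Int) := by
    have h0 : Int.gcd a b ≠ 0 := fun h => by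
      have := Int.gcd_eq_zero_iff.mp h
      omega
    omega
  obtain ⟨L, hLeq, hL2, hLd, hLp, hLiff⟩ :=
    factorLoop_spec 2 (↑(Int.gcd a b)) [] (by omega) hM
      (fun d h1 h2 => absurd h2 (by omega))
  rw [List.nil_append] at hLeq
  rw [PySem.List.foldl_if_add_one]
  set hi := min (a + b) (n - a - b + 1) with hhi
  by_cases hlt : b < hi
  · rw [if_pos hlt, countP_pyRange]
    have hfc : (Finset.Ico b hi).filter (fun c => (Int.gcd (↑(Int.gcd a b) : Int) c == 1) = true)
             = (Finset.Ico b hi).filter (fun c => ∀ x ∈ L, ¬ x ∣ c) := by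
      apply Finset.filter_congr
      intro c _
      simp only [beq_iff_eq, eq_iff_iff]
      exact hLiff c
    have hsplit := card_Ico_filter_split b hi (by omega) hlt (fun c => ∀ x ∈ L, ¬ x ∣ c)
    have e1 := legendre_spec L hL2 hLp (hi - 1) (by omega)
    have e2 := legendre_spec L hL2 hLp (b - 1) (by omega)
    rw [hLeq, e1, e2, hfc]
    omega
  · rw [if_neg hlt, PySem.List.pyRange_one_eq_nil (by omega)]
    simp

-- ===== VERDICT =====
theorem prim_brute_spec : Claim_equal_prim_brute := by
  intro n _
  unfold Spec_prim_brute prim_brute prim_brute_alt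
  apply PySem.List.foldl_congr_mem
  intro acc a ha
  rw [PySem.List.mem_pyRange_one] at ha
  apply PySem.List.foldl_congr_mem
  intro acc2 b hb
  rw [PySem.List.mem_pyRange_one] at hb
  exact step_eq n a b acc2 (by omega) (by omega)
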